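-- pv_equiv track=rewrite | github.com/FrenchCommando/advent_of_code | 2022/day23.py | large_grid
-- ===== SOURCE A (Python) =====
-- def large_grid(grid, grid_extension):
--     large_grid_out = [
--         [
--             False for j in range(len(grid[0]) + 2 * grid_extension)
--         ] for i in range(len(grid) + 2 * grid_extension)
--     ]
--     for i in range(len(grid)):
--         for j in range(len(grid[0])):
--             if grid[i][j] == "#":
--                 large_grid_out[i + grid_extension][j + grid_extension] = True
--     return large_grid_out
-- ===== SOURCE B (Python) =====
-- def large_grid(grid, grid_extension):
--     h, w, e = len(grid), len(grid[0]), grid_extension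
--     hashes = {
--         (i + e, j + e)
--         for i in range(h)
--         for j in range(w)
--         if grid[i][j] == "#"
--     }
--     return [[(r, c) in hashes for c in range(w + 2 * e)]
--             for r in range(h + 2 * e)]
-- ===== Notes on version B (the rewrite author's own statement) =====
-- stated objective: alternative
-- what changed: B first collects the '#' cells into a sparse set of padded coordinates, then generates every cell of the output grid as a membership test against that set, instead of A's dense allocate-all-False-then-mutate fill.
-- outside the precondition, e.g. on large_grid([], 0): A returns [], B raises IndexError
import Mathlib
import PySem

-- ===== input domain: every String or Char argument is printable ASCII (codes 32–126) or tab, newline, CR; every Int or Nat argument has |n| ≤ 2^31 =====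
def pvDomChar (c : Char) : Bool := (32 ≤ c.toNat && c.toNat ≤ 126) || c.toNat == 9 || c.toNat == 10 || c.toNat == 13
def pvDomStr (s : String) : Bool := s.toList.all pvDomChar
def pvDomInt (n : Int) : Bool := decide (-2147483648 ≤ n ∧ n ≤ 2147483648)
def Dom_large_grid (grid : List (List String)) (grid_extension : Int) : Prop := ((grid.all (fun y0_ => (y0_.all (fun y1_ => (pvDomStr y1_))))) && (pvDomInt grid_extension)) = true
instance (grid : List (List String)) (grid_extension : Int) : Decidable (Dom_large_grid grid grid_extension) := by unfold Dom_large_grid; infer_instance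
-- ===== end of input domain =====

-- B collects the '#' cells into a sparse set of padded coordinates and generates the grid by
-- membership tests, instead of A's allocate-all-False-then-mutate dense fill; equal returns on Pre_.

-- ===== PORT A =====
-- A: allocate an (H+2e)×(W+2e) all-False grid, then mutate cell (i+e, j+e) to True for each '#'.
def large_grid (grid : List (List String)) (grid_extension : Int) : List (List Bool) :=
  let large_grid_out : List (List Bool) :=
    (PySem.List.pyRange 0 ((grid.length : Int) + 2 * grid_extension) 1).map (fun _ =>
      (PySem.List.pyRange 0 (((PySem.List.pyGetD grid 0 []).length : Int) + 2 * grid_extension) 1).map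
        (fun _ => false))
  (PySem.List.pyRange 0 (grid.length : Int) 1).foldl (fun out i =>
    (PySem.List.pyRange 0 ((PySem.List.pyGetD grid 0 []).length : Int) 1).foldl (fun out j =>
      if PySem.List.pyGetD (PySem.List.pyGetD grid i []) j "" = "#" then
        -- large_grid_out[i+ge][j+ge] = True  (indices nonnegative and in range on Pre_)
        out.modify (i + grid_extension).toNat (fun row => row.set (j + grid_extension).toNat true)
      else out) out) large_grid_out

-- ===== PORT B =====
-- B: build the set of padded '#' coordinates, then emit each cell as a membership test.
def large_grid_alt (grid : List (List String)) (grid_extension : Int) : List (List Bool) :=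
  let h : Nat := grid.length
  let w : Nat := (PySem.List.pyGetD grid 0 []).length
  let hashes : PySem.Set (Int × Int) :=
    (PySem.List.pyRange 0 (h : Int) 1).foldl (fun s i =>
      (PySem.List.pyRange 0 (w : Int) 1).foldl (fun s j =>
        if PySem.List.pyGetD (PySem.List.pyGetD grid i []) j "" = "#" then
          PySem.Set.add s (i + grid_extension, j + grid_extension)
        else s) s) PySem.Set.empty
  (PySem.List.pyRange 0 ((h : Int) + 2 * grid_extension) 1).map (fun r =>
    (PySem.List.pyRange 0 ((w : Int) + 2 * grid_extension) 1).map (fun c =>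
      PySem.Set.contains hashes (r, c)))

-- ===== PRECONDITION & SPEC =====
-- Pre_ excludes the empty grid and grids with a row shorter than row 0 (Python A raises IndexError
-- there) and negative grid_extension — a negative padding amount is outside the task's natural
-- domain, where A's returned values (truncated grids / negative-index wraparound) are accidental.
def Pre_large_grid (grid : List (List String)) (grid_extension : Int) : Prop :=
  grid ≠ [] ∧ 0 ≤ grid_extension ∧ ∀ row ∈ grid, (grid.headD []).length ≤ row.length
instance (grid : List (List String)) (grid_extension : Int) : Decidable (Pre_large_grid grid grid_extension) := by unfold Pre_large_grid; infer_instance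

def pvWitness_large_grid : List (List String) × Int := ([["#", "."], [".", "#"]], 1)

def Spec_large_grid (grid : List (List String)) (grid_extension : Int) (out : List (List Bool)) : Prop := out = large_grid_alt grid grid_extension
instance (grid : List (List String)) (grid_extension : Int) (out : List (List Bool)) : Decidable (Spec_large_grid grid grid_extension out) := by unfold Spec_large_grid; infer_instance

-- ===== CLAIM (what is proved, stated in full; the proofs are below) =====
def Claim_equal_large_grid : Prop := ∀ (grid : List (List String)) (grid_extension : Int), Dom_large_grid grid grid_extension → Pre_large_grid grid grid_extension → Spec_large_grid grid grid_extension (large_grid grid grid_extension)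

-- ===== LEMMAS AND PROOFS =====

-- a fold over j that always modifies the same row index is one modify of that row
theorem foldl_modify_fixed {q : Nat → Prop} [DecidablePred q] (ti : Nat)
    (h : Nat → List Bool → List Bool) :
    ∀ (js : List Nat) (out : List (List Bool)),
      js.foldl (fun o j => if q j then o.modify ti (h j) else o) out
        = out.modify ti (fun row => js.foldl (fun r j => if q j then h j r else r) row) := by
  intro js
  induction js with
  | nil => intro out; exact (List.modify_id ti out).symm
  | cons j js ih =>
    intro out
    simp only [List.foldl_cons]
    rw [ih]
    by_cases hq : q j
    · simp [hq, List.modify_modify_eq, Function.comp_def]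
    · simp [hq]

-- length is preserved by the inner set-fold
theorem length_foldl_set {q : Nat → Prop} [DecidablePred q] (e : Nat) :
    ∀ (js : List Nat) (row : List Bool),
      (js.foldl (fun r j => if q j then r.set (j + e) true else r) row).length = row.length := by
  intro js
  induction js with
  | nil => intro row; rfl
  | cons j js ih =>
    intro row
    simp only [List.foldl_cons]
    rw [ih]
    by_cases hq : q j <;> simp [hq]

-- pointwise value of the inner set-fold over range m
theorem inner_get {q : Nat → Prop} [DecidablePred q] (e : Nat) :
    ∀ (m : Nat) (row : List Bool) (c : Nat), e + m ≤ row.length →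
      ((List.range m).foldl (fun r j => if q j then r.set (j + e) true else r) row)[c]?
        = if e ≤ c ∧ c < e + m ∧ q (c - e) then some true else row[c]? := by
  intro m
  induction m with
  | zero => intro row c _; simp; omega
  | succ m ih =>
    intro row c hlen
    rw [List.range_succ, List.foldl_append]
    simp only [List.foldl_cons, List.foldl_nil]
    by_cases hq : q m
    · rw [if_pos hq, List.getElem?_set, length_foldl_set, ih row c (by omega)]
      by_cases hc : m + e = c
      · have : e ≤ c ∧ c < e + (m + 1) ∧ q (c - e) := by
          refine ⟨by omega, by omega, ?_⟩
          have : c - e = m := by omega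
          rwa [this]
        simp [hc, this, ((by omega : c < row.length))]
      · by_cases h1 : e ≤ c ∧ c < e + m ∧ q (c - e)
        · have h2 : e ≤ c ∧ c < e + (m + 1) ∧ q (c - e) := ⟨h1.1, by omega, h1.2.2⟩
          simp [hc, h1, h2]
        · have h2 : ¬(e ≤ c ∧ c < e + (m + 1) ∧ q (c - e)) := by
            intro ⟨a, b, d⟩
            exact h1 ⟨a, by omega, d⟩
          simp [hc, h1, h2]
    · rw [if_neg hq, ih row c (by omega)]
      by_cases h1 : e ≤ c ∧ c < e + m ∧ q (c - e)
      · have h2 : e ≤ c ∧ c < e + (m + 1) ∧ q (c - e) := ⟨h1.1, by omega, h1.2.2⟩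
        simp [h1, h2]
      · by_cases h2 : e ≤ c ∧ c < e + (m + 1) ∧ q (c - e)
        · exfalso
          rcases h2 with ⟨ha, hb, hd⟩
          by_cases hcm : c < e + m
          · exact h1 ⟨ha, hcm, hd⟩
          · have hce : c - e = m := by omega
            exact hq (hce ▸ hd)
        · simp [h1, h2]

-- pointwise value of the outer fold modifying row i+e at step i
theorem outer_get (e : Nat) (R : Nat → List Bool → List Bool) :
    ∀ (n : Nat) (out : List (List Bool)) (r : Nat),
      ((List.range n).foldl (fun o i => o.modify (i + e) (R i)) out)[r]?
        = if e ≤ r ∧ r < e + n then (out[r]?).map (R (r - e)) else out[r]? := by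
  intro n
  induction n with
  | zero => intro out r; simp
  | succ n ih =>
    intro out r
    rw [List.range_succ, List.foldl_append]
    simp only [List.foldl_cons, List.foldl_nil]
    rw [List.getElem?_modify, ih out r]
    by_cases hr : n + e = r
    · have hmem : ¬(e ≤ r ∧ r < e + n) := by omega
      have hmem' : e ≤ r ∧ r < e + (n + 1) := by omega
      have hren : r - e = n := by omega
      rw [if_neg hmem, if_pos hmem', hren]
      cases out[r]? with
      | none => rfl
      | some a => simp [hr]
    · by_cases h1 : e ≤ r ∧ r < e + n
      · have h2 : e ≤ r ∧ r < e + (n + 1) := ⟨h1.1, by omega⟩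
        rw [if_pos h1, if_pos h2]
        cases out[r]? <;> simp [hr]
      · have h2 : ¬(e ≤ r ∧ r < e + (n + 1)) := by omega
        rw [if_neg h1, if_neg h2]
        cases out[r]? <;> simp [hr]

-- A's whole initialize-then-mutate computation, pointwise form
theorem A_eq_target (n m e : Nat) (q : Nat → Nat → Prop) [inst : ∀ i j, Decidable (q i j)] :
    (List.range n).foldl (fun out i =>
        (List.range m).foldl (fun out j =>
          if q i j then out.modify (i + e) (fun row => row.set (j + e) true) else out) out)
      (List.replicate (n + 2 * e) (List.replicate (m + 2 * e) false))
    = (List.range (n + 2 * e)).map (fun r =>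
        (List.range (m + 2 * e)).map (fun c =>
          decide (e ≤ r ∧ r < e + n ∧ e ≤ c ∧ c < e + m ∧ q (r - e) (c - e)))) := by
  have hinner : ∀ (out : List (List Bool)) (i : Nat),
      ((List.range m).foldl (fun out j =>
          if q i j then out.modify (i + e) (fun row => row.set (j + e) true) else out) out)
        = out.modify (i + e) (fun row =>
            (List.range m).foldl (fun r j => if q i j then r.set (j + e) true else r) row) :=
    fun out i => foldl_modify_fixed (q := q i) (i + e)
      (fun j row => row.set (j + e) true) (List.range m) out
  rw [PySem.List.foldl_congr_mem _ _ _ _ (fun out i _ => hinner out i)]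
  apply List.ext_getElem?
  intro r
  rw [outer_get e _ n _ r, List.getElem?_map]
  simp only [List.getElem?_replicate]
  by_cases hrange : r < n + 2 * e
  · rw [if_pos hrange, List.getElem?_range hrange]
    by_cases hr : e ≤ r ∧ r < e + n
    · rw [if_pos hr]
      simp only [Option.map_some, Option.some.injEq]
      apply List.ext_getElem?
      intro c
      rw [inner_get e m _ c (by simp; omega), List.getElem?_map]
      simp only [List.getElem?_replicate]
      by_cases hcrange : c < m + 2 * e
      · rw [if_pos hcrange, List.getElem?_range hcrange]
        by_cases hc : e ≤ c ∧ c < e + m ∧ q (r - e) (c - e)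
        · rw [if_pos hc]
          have : (e ≤ r ∧ r < e + n ∧ e ≤ c ∧ c < e + m ∧ q (r - e) (c - e)) :=
            ⟨hr.1, hr.2, hc.1, hc.2.1, hc.2.2⟩
          simp [this]
        · rw [if_neg hc]
          simp
          intro _ _ h1 h2 h3
          exact hc ⟨h1, h2, h3⟩
      · rw [if_neg hcrange,
          if_neg (show ¬(e ≤ c ∧ c < e + m ∧ q (r - e) (c - e)) by rintro ⟨-, h, -⟩; omega)]
        have : (List.range (m + 2 * e))[c]? = none :=
          List.getElem?_eq_none (by simp only [List.length_range]; omega)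
        rw [this, Option.map_none]
    · rw [if_neg hr]
      simp only [Option.map_some, Option.some.injEq]
      apply List.ext_getElem?
      intro c
      rw [List.getElem?_map]
      simp only [List.getElem?_replicate]
      by_cases hcrange : c < m + 2 * e
      · rw [if_pos hcrange, List.getElem?_range hcrange]
        simp
        intro h1 h2
        exact absurd ⟨h1, h2⟩ hr
      · rw [if_neg hcrange]
        have : (List.range (m + 2 * e))[c]? = none :=
          List.getElem?_eq_none (by simp only [List.length_range]; omega)
        rw [this, Option.map_none]
  · rw [if_neg hrange, if_neg (show ¬(e ≤ r ∧ r < e + n) by omega)]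
    have : (List.range (n + 2 * e))[r]? = none :=
      List.getElem?_eq_none (by simp only [List.length_range]; omega)
    rw [this, Option.map_none]

-- membership in a single conditional-add fold over range m
theorem mem_add_fold {α : Type} [BEq α] [LawfulBEq α] (f : Nat → α) (q : Nat → Prop)
    [DecidablePred q] :
    ∀ (m : Nat) (s : PySem.Set α) (p : α),
      p ∈ (List.range m).foldl (fun s j => if q j then PySem.Set.add s (f j) else s) s
        ↔ p ∈ s ∨ ∃ j, j < m ∧ q j ∧ p = f j := by
  intro m
  induction m with
  | zero => intro s p; simp
  | succ m ih =>
    intro s p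
    rw [List.range_succ, List.foldl_append]
    simp only [List.foldl_cons, List.foldl_nil]
    by_cases hq : q m
    · rw [if_pos hq, PySem.Set.mem_add, ih s p]
      constructor
      · rintro ((hs | ⟨j, hj, hqj, rfl⟩) | rfl)
        · exact Or.inl hs
        · exact Or.inr ⟨j, by omega, hqj, rfl⟩
        · exact Or.inr ⟨m, by omega, hq, rfl⟩
      · rintro (hs | ⟨j, hj, hqj, rfl⟩)
        · exact Or.inl (Or.inl hs)
        · by_cases hjm : j = m
          · subst hjm; exact Or.inr rfl
          · exact Or.inl (Or.inr ⟨j, by omega, hqj, rfl⟩)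
    · rw [if_neg hq, ih s p]
      constructor
      · rintro (hs | ⟨j, hj, hqj, rfl⟩)
        · exact Or.inl hs
        · exact Or.inr ⟨j, by omega, hqj, rfl⟩
      · rintro (hs | ⟨j, hj, hqj, rfl⟩)
        · exact Or.inl hs
        · by_cases hjm : j = m
          · subst hjm; exact absurd hqj hq
          · exact Or.inr ⟨j, by omega, hqj, rfl⟩

-- membership in the double conditional-add fold building the coordinate set
theorem mem_hash_fold (m : Nat) (f : Nat → Nat → Int × Int) (q : Nat → Nat → Prop)
    [inst : ∀ i j, Decidable (q i j)] :
    ∀ (n : Nat) (s : PySem.Set (Int × Int)) (p : Int × Int),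
      p ∈ (List.range n).foldl (fun s i =>
            (List.range m).foldl (fun s j =>
              if q i j then PySem.Set.add s (f i j) else s) s) s
        ↔ p ∈ s ∨ ∃ i, i < n ∧ ∃ j, j < m ∧ q i j ∧ p = f i j := by
  intro n
  induction n with
  | zero => intro s p; simp
  | succ n ih =>
    intro s p
    rw [List.range_succ, List.foldl_append]
    simp only [List.foldl_cons, List.foldl_nil]
    rw [mem_add_fold (f n) (q n) m _ p, ih s p]
    constructor
    · rintro ((hs | ⟨i, hi, j, hj, hqj, rfl⟩) | ⟨j, hj, hqj, rfl⟩)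
      · exact Or.inl hs
      · exact Or.inr ⟨i, by omega, j, hj, hqj, rfl⟩
      · exact Or.inr ⟨n, by omega, j, hj, hqj, rfl⟩
    · rintro (hs | ⟨i, hi, j, hj, hqj, rfl⟩)
      · exact Or.inl (Or.inl hs)
      · by_cases hin : i = n
        · subst hin; exact Or.inr ⟨j, hj, hqj, rfl⟩
        · exact Or.inl (Or.inr ⟨i, by omega, j, hj, hqj, rfl⟩)

-- B's membership-test generation, pointwise form
theorem B_eq_target (n m e : Nat) (q : Nat → Nat → Prop) [inst : ∀ i j, Decidable (q i j)] :
    (List.range (n + 2 * e)).map (fun (r : Nat) =>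
      (List.range (m + 2 * e)).map (fun (c : Nat) =>
        PySem.Set.contains
          ((List.range n).foldl (fun s i =>
              (List.range m).foldl (fun s j =>
                if q i j then PySem.Set.add s ((i : Int) + (e : Int), (j : Int) + (e : Int))
                else s) s) PySem.Set.empty)
          ((r : Int), (c : Int))))
    = (List.range (n + 2 * e)).map (fun r =>
        (List.range (m + 2 * e)).map (fun c =>
          decide (e ≤ r ∧ r < e + n ∧ e ≤ c ∧ c < e + m ∧ q (r - e) (c - e)))) := by
  apply List.map_congr_left
  intro r _
  apply List.map_congr_left
  intro c _
  rw [Bool.eq_iff_iff]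
  simp only [PySem.Set.contains, List.contains_iff_mem, decide_eq_true_eq]
  rw [mem_hash_fold m (fun i j => ((i : Int) + (e : Int), (j : Int) + (e : Int))) q n
      PySem.Set.empty ((r : Int), (c : Int))]
  constructor
  · rintro (hs | ⟨i, hi, j, hj, hqj, hp⟩)
    · simp [PySem.Set.empty] at hs
    · have hr : r = i + e := by
        have := congrArg Prod.fst hp; simp at this; omega
      have hc : c = j + e := by
        have := congrArg Prod.snd hp; simp at this; omega
      subst hr; subst hc
      refine ⟨by omega, by omega, by omega, by omega, ?_⟩
      have h1 : i + e - e = i := by omega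
      have h2 : j + e - e = j := by omega
      rw [h1, h2]; exact hqj
  · rintro ⟨h1, h2, h3, h4, h5⟩
    refine Or.inr ⟨r - e, by omega, c - e, by omega, h5, ?_⟩
    have hr : ((r : Int)) = ((r - e : Nat) : Int) + (e : Int) := by omega
    have hc : ((c : Int)) = ((c - e : Nat) : Int) + (e : Int) := by omega
    exact Prod.ext hr hc

-- ===== VERDICT (by name: the statement is the Claim_ definition above) =====
theorem large_grid_spec : Claim_equal_large_grid := by
  intro grid ge _ hpre
  obtain ⟨hne, hge, _⟩ := hpre
  obtain ⟨e, rfl⟩ := Int.eq_ofNat_of_zero_le hge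
  show large_grid grid (e : Int) = large_grid_alt grid (e : Int)
  simp only [large_grid, large_grid_alt]
  have hcast1 : (grid.length : Int) + 2 * (e : Int) = ((grid.length + 2 * e : Nat) : Int) := by
    omega
  have hcast2 : ((PySem.List.pyGetD grid 0 []).length : Int) + 2 * (e : Int)
      = (((PySem.List.pyGetD grid 0 []).length + 2 * e : Nat) : Int) := by omega
  have htoNat : ∀ k : Nat, ((k : Int) + (e : Int)).toNat = k + e := by intro k; omega
  rw [hcast1, hcast2, PySem.List.pyRange_zero_natCast, PySem.List.pyRange_zero_natCast,
    PySem.List.pyRange_zero_natCast, PySem.List.pyRange_zero_natCast]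
  simp only [List.foldl_map, List.map_map, List.map_const', List.length_range,
    htoNat, Function.comp_def]
  rw [A_eq_target grid.length (PySem.List.pyGetD grid 0 []).length e
    (fun i j => PySem.List.pyGetD (PySem.List.pyGetD grid (i : Int) []) ((j : Int)) "" = "#")]
  exact (B_eq_target grid.length (PySem.List.pyGetD grid 0 []).length e
    (fun i j => PySem.List.pyGetD (PySem.List.pyGetD grid (i : Int) []) ((j : Int)) "" = "#")).symm
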